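-- pv_equiv track=rewrite | github.com/PilotJinix/Python_Code | Asisten/Pert 2/tugas/main.py | cek
-- ===== SOURCE A (Python) =====
-- dataarray = [1, 2, 3, 2, 5, 7, 6, 5, 4, 4, 4, 5, 6, 3, 2, 1, 7, 8, 10, 1, 2, 3, 4, 5, 6, 7, 8, 9]
--
-- def cek(jumlahdata, dicari, result):
--     def hasil1():
--         return result+1
--
--     def hasil0():
--         return result + 0
--
--     if jumlahdata > 0:
--         if dicari == dataarray[jumlahdata - 1]:
--             return cek(jumlahdata - 1, dicari, hasil1())
--         else:
--             return cek(jumlahdata - 1, dicari, hasil0())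
--     else:
--         return result
-- ===== SOURCE B (Python) =====
-- dataarray = [1, 2, 3, 2, 5, 7, 6, 5, 4, 4, 4, 5, 6, 3, 2, 1, 7, 8, 10, 1, 2, 3, 4, 5, 6, 7, 8, 9]
--
-- def cek(jumlahdata, dicari, result):
--     for i in range(jumlahdata):
--         if dataarray[i] == dicari:
--             result += 1
--     return result
-- ===== Notes on version B (the rewrite author's own statement) =====
-- stated objective: idiomatic
-- what changed: Replaces the top-down recursion with inner closures by a plain iterative for-loop over range(jumlahdata) accumulating the count in result.
import Mathlib
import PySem

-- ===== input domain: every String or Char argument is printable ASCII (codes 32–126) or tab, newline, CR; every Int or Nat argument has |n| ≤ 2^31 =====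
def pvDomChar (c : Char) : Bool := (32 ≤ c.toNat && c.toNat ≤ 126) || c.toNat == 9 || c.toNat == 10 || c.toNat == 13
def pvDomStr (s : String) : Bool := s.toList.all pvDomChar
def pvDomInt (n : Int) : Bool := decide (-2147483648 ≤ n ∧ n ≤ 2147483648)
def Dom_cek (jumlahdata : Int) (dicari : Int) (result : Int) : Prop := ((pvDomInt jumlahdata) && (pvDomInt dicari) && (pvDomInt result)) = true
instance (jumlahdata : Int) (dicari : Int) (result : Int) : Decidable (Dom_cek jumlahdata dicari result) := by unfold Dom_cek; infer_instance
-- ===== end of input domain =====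

-- B replaces A's top-down recursion (with inner closures) by a plain iterative loop over range(jumlahdata); return value only, idiomatic, same cost.

-- ===== PORT A =====
def dataarray : List Int := [1, 2, 3, 2, 5, 7, 6, 5, 4, 4, 4, 5, 6, 3, 2, 1, 7, 8, 10, 1, 2, 3, 4, 5, 6, 7, 8, 9]

-- pyGetD is total; Pre_cek restricts to jumlahdata ≤ 28, where Python's indexing never raises.
def cek (jumlahdata : Int) (dicari : Int) (result : Int) : Int :=
  if h : jumlahdata > 0 then
    if dicari == PySem.List.pyGetD dataarray (jumlahdata - 1) 0 then
      cek (jumlahdata - 1) dicari (result + 1)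
    else
      cek (jumlahdata - 1) dicari (result + 0)
  else
    result
termination_by jumlahdata.toNat
decreasing_by all_goals omega

-- ===== PORT B =====
def cek_alt (jumlahdata : Int) (dicari : Int) (result : Int) : Int :=
  (PySem.List.pyRange 0 jumlahdata 1).foldl
    (fun r i => if PySem.List.pyGetD dataarray i 0 == dicari then r + 1 else r) result

-- ===== PRECONDITION & SPEC =====
-- A (and B) raise IndexError exactly when jumlahdata > 28 = len(dataarray); A also hits the
-- recursion limit there first for huge jumlahdata. Pre_ admits exactly the inputs where A returns.
def Pre_cek (jumlahdata : Int) (dicari : Int) (result : Int) : Prop := jumlahdata ≤ 28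
instance (jumlahdata : Int) (dicari : Int) (result : Int) : Decidable (Pre_cek jumlahdata dicari result) := by unfold Pre_cek; infer_instance
def pvWitness_cek : Int × Int × Int := (5, 2, 0)

def Spec_cek (jumlahdata : Int) (dicari : Int) (result : Int) (out : Int) : Prop := out = cek_alt jumlahdata dicari result
instance (jumlahdata : Int) (dicari : Int) (result : Int) (out : Int) : Decidable (Spec_cek jumlahdata dicari result out) := by unfold Spec_cek; infer_instance

-- ===== CLAIM (what is proved, stated in full; the proofs are below) =====
def Claim_equal_cek : Prop := ∀ (jumlahdata : Int) (dicari : Int) (result : Int), Dom_cek jumlahdata dicari result → Pre_cek jumlahdata dicari result → Spec_cek jumlahdata dicari result (cek jumlahdata dicari result)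

-- ===== LEMMAS AND PROOFS =====

-- Folding B's step from a shifted accumulator shifts the result (specific to B's loop body).
theorem foldl_step_shift (d c : Int) (l : List Int) : ∀ (r : Int),
    l.foldl (fun r i => if PySem.List.pyGetD dataarray i 0 == d then r + 1 else r) (r + c)
      = l.foldl (fun r i => if PySem.List.pyGetD dataarray i 0 == d then r + 1 else r) r + c := by
  induction l with
  | nil => intro r; rfl
  | cons a t ih =>
    intro r
    simp only [List.foldl_cons]
    split_ifs
    · rw [show r + c + 1 = r + 1 + c by ring, ih]
    · exact ih r

-- A counts down from jumlahdata; B folds up over range(jumlahdata). Bridge by induction on the Nat length.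
theorem cek_natCast (j : Nat) (dicari : Int) : ∀ (result : Int),
    cek (j : Int) dicari result =
      (PySem.List.pyRange 0 (j : Int) 1).foldl
        (fun r i => if PySem.List.pyGetD dataarray i 0 == dicari then r + 1 else r) result := by
  induction j with
  | zero =>
    intro result
    rw [cek]
    simp [PySem.List.pyRange_one_eq_nil]
  | succ n ih =>
    intro result
    rw [cek]
    have hcast : ((n + 1 : Nat) : Int) - 1 = (n : Int) := by push_cast; ring
    have hrange : PySem.List.pyRange 0 ((n + 1 : Nat) : Int) 1
        = PySem.List.pyRange 0 (n : Int) 1 ++ [(n : Int)] := by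
      have : ((n + 1 : Nat) : Int) = (n : Int) + 1 := by push_cast; ring
      rw [this, PySem.List.pyRange_one_succ_right (by positivity)]
    have hpos : ((n + 1 : Nat) : Int) > 0 := by positivity
    rw [dif_pos hpos, hcast, hrange, List.foldl_append]
    simp only [List.foldl_cons, List.foldl_nil]
    have hbc : (dicari == PySem.List.pyGetD dataarray (n : Int) 0)
        = (PySem.List.pyGetD dataarray (n : Int) 0 == dicari) := by
      rw [Bool.eq_iff_iff]
      simp only [beq_iff_eq]
      exact eq_comm
    rw [hbc]
    by_cases h : (PySem.List.pyGetD dataarray (n : Int) 0 == dicari) = true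
    · rw [if_pos h, if_pos h, ih, foldl_step_shift]
    · rw [if_neg h, if_neg h, ih (result + 0), add_zero]

-- ===== VERDICT (by name: the statement is the Claim_ definition above) =====
theorem cek_spec : Claim_equal_cek := by
  intro jumlahdata dicari result _ _
  unfold Spec_cek cek_alt
  by_cases hpos : 0 < jumlahdata
  · have h : jumlahdata = ((jumlahdata.toNat : Nat) : Int) := by omega
    rw [h]
    exact cek_natCast jumlahdata.toNat dicari result
  · rw [cek, dif_neg hpos, PySem.List.pyRange_one_eq_nil (by omega)]
    rfl
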